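-- pv_equiv track=rewrite | github.com/Herdran/wiet | WDI_7/15.py | system_trojkowy
-- ===== SOURCE A (Python) =====
-- def system_trojkowy(n):
--     list_ = []
--     while n > 0:
--         list_.append(n%3)
--         n //= 3
--     n1 = list_.count(1)
--     n2 = list_.count(2)
--     return n1 > n2
-- ===== SOURCE B (Python) =====
-- def system_trojkowy(n):
--     # Legendre-style: digit sum S = n - 2*sum(n // 3^k, k>=1), computed while
--     # counting positions whose base-3 digit is 2 by the threshold test
--     # n % (3*p) >= 2*p.  Then c1 - c2 = S - 3*c2, so answer is S > 3*c2.
--     s = n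
--     c2 = 0
--     p = 1
--     while p <= n:
--         s -= 2 * (n // (3 * p))
--         if n % (3 * p) >= 2 * p:
--             c2 += 1
--         p *= 3
--     return s > 3 * c2
-- ===== Notes on version B (the rewrite author's own statement) =====
-- stated objective: alternative
-- what changed: B never extracts or stores digits of a mutated n: it scans powers p=3^k, computing the base-3 digit sum via the Legendre identity S = n - 2*sum(n//3^k) and counting digit-2 positions by the threshold test n % (3p) >= 2p, then uses the identity c1 - c2 = S - 3*c2 to return S > 3*c2.
import Mathlib
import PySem

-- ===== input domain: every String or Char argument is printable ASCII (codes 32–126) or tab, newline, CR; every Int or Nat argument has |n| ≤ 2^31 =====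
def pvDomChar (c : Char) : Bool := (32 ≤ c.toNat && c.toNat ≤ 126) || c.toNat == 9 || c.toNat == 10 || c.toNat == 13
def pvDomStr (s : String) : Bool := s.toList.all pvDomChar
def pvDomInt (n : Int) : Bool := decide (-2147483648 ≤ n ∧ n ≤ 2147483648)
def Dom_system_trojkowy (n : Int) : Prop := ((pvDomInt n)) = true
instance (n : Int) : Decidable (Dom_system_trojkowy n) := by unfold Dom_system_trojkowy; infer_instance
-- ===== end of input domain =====

-- B drops A's digit list and count scans: it scans powers of 3, computing the base-3
-- digit sum via the Legendre identity and counting digit-2 positions by a threshold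
-- test, then uses c1 - c2 = S - 3*c2; objective: alternative (no digit list, n unmutated).

-- ===== PORT A =====
-- A's while loop (fuel-bounded structural recursion; fuel = n.toNat bounds the
-- iteration count, since n strictly decreases while it stays positive):
-- each iteration appends n%3 to the list, then n //= 3.
def sysA_loop (fuel : Nat) (n : Int) (list_ : List Int) : List Int :=
  match fuel with
  | 0 => list_
  | fuel + 1 =>
    if n > 0 then sysA_loop fuel (PySem.Int.floordiv n 3) (list_ ++ [PySem.Int.mod n 3])
    else list_

def system_trojkowy (n : Int) : Bool :=
  let list_ := sysA_loop n.toNat n []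
  let n1 := PySem.List.count list_ 1
  let n2 := PySem.List.count list_ 2
  decide (n1 > n2)

-- ===== PORT B =====
-- B's while loop over powers p = 3^k (fuel-bounded; the loop runs at most
-- ⌈log3 n⌉ + 1 ≤ n.toNat times for n ≥ 1): state (s, c2), p grows, n untouched.
def sysB_loop (fuel : Nat) (n p s c2 : Int) : Int × Int :=
  match fuel with
  | 0 => (s, c2)
  | fuel + 1 =>
    if p ≤ n then
      sysB_loop fuel n (p * 3)
        (s - 2 * PySem.Int.floordiv n (3 * p))
        (if PySem.Int.mod n (3 * p) ≥ 2 * p then c2 + 1 else c2)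
    else (s, c2)

def system_trojkowy_alt (n : Int) : Bool :=
  let r := sysB_loop n.toNat n 1 n 0
  decide (r.1 > 3 * r.2)

-- ===== PRECONDITION & SPEC =====
def Spec_system_trojkowy (n : Int) (out : Bool) : Prop := out = system_trojkowy_alt n
instance (n : Int) (out : Bool) : Decidable (Spec_system_trojkowy n out) := by unfold Spec_system_trojkowy; infer_instance

-- ===== CLAIM (what is proved, stated in full; the proofs are below) =====
def Claim_equal_system_trojkowy : Prop := ∀ (n : Int), Dom_system_trojkowy n → Spec_system_trojkowy n (system_trojkowy n)

-- ===== LEMMAS AND PROOFS =====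

-- canonical base-3 digit list (least significant first); proof-side helper only
def pvDigs (n : Int) : List Int :=
  if _h : n > 0 then PySem.Int.mod n 3 :: pvDigs (PySem.Int.floordiv n 3) else []
termination_by n.toNat
decreasing_by
  rw [PySem.Int.floordiv_eq_ediv_of_pos (by omega : (0:Int) < 3)]
  omega

theorem sysA_loop_append (k : Nat) : ∀ (n : Int) (acc : List Int),
    sysA_loop k n acc = acc ++ sysA_loop k n [] := by
  induction k with
  | zero => intro n acc; simp [sysA_loop]
  | succ k ih =>
    intro n acc
    by_cases h : n > 0
    · simp only [sysA_loop, if_pos h, List.nil_append]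
      rw [ih, ih _ [PySem.Int.mod n 3]]
      simp
    · simp [sysA_loop, if_neg h]

theorem sysA_loop_eq_digs (k : Nat) : ∀ (n : Int), n.toNat ≤ k →
    sysA_loop k n [] = pvDigs n := by
  induction k with
  | zero =>
    intro n hk
    have : ¬ n > 0 := by omega
    simp [sysA_loop, pvDigs, this]
  | succ k ih =>
    intro n hk
    by_cases h : n > 0
    · rw [sysA_loop, if_pos h, sysA_loop_append, pvDigs, dif_pos h, ih]
      · simp
      · rw [PySem.Int.floordiv_eq_ediv_of_pos (by omega : (0:Int) < 3)]
        omega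
    · simp [sysA_loop, pvDigs, h]

theorem mem_pvDigs (n : Int) : ∀ x ∈ pvDigs n, x = 0 ∨ x = 1 ∨ x = 2 := by
  induction n using pvDigs.induct with
  | case1 n h ih =>
    intro x hx
    rw [pvDigs, dif_pos h] at hx
    rcases List.mem_cons.mp hx with rfl | hx
    · have := PySem.Int.mod_eq_emod_of_pos (a := n) (b := 3) (by omega)
      omega
    · exact ih x hx
  | case2 n h =>
    intro x hx
    rw [pvDigs, dif_neg h] at hx
    simp at hx

theorem sum_eq_counts (l : List Int) (h : ∀ x ∈ l, x = 0 ∨ x = 1 ∨ x = 2) :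
    l.sum = (l.count 1 : Int) + 2 * (l.count 2 : Int) := by
  induction l with
  | nil => simp
  | cons a l ih =>
    have ha := h a (by simp)
    have hl := fun x hx => h x (List.mem_cons_of_mem a hx)
    rw [List.sum_cons, List.count_cons, List.count_cons, ih hl]
    rcases ha with rfl | rfl | rfl <;> simp <;> ring

theorem sysB_loop_eq (k : Nat) : ∀ (n p s c2 : Int), 0 ≤ n → 0 < p →
    (n / p).toNat ≤ k →
    sysB_loop k n p s c2 =
      (s + (pvDigs (n / p)).sum - n / p, c2 + ((pvDigs (n / p)).count 2 : Int)) := by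
  induction k with
  | zero =>
    intro n p s c2 hn hp hk
    have h0 : n / p = 0 := by
      have := Int.ediv_nonneg hn (le_of_lt hp)
      omega
    rw [h0]
    simp [sysB_loop, pvDigs]
  | succ k ih =>
    intro n p s c2 hn hp hk
    by_cases hcond : p ≤ n
    · have h3p : (0:Int) < 3 * p := by omega
      have hdd : n / (3 * p) = n / p / 3 := by
        rw [mul_comm 3 p, ← Int.ediv_ediv_of_nonneg (le_of_lt hp)]
      set m := n / p with hmdef
      have hm1 : 1 ≤ m := by
        rw [hmdef]
        exact (Int.le_ediv_iff_mul_le hp).mpr (by omega)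
      -- the threshold test reads off the base-3 digit of m
      have hM : PySem.Int.mod n (3 * p) = p * (m % 3) + n % p := by
        rw [PySem.Int.mod_eq_emod_of_pos h3p, Int.emod_def, hdd]
        have hnp : p * m + n % p = n := by
          have := Int.mul_ediv_add_emod n p
          omega
        have hm3 : 3 * (m / 3) + m % 3 = m := by omega
        nlinarith [hnp, hm3]
      have hr0 : 0 ≤ n % p := Int.emod_nonneg n (by omega)
      have hrp : n % p < p := Int.emod_lt_of_pos n hp
      have hdig : (PySem.Int.mod n (3 * p) ≥ 2 * p) ↔ m % 3 = 2 := by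
        have h01 : m % 3 = 0 ∨ m % 3 = 1 ∨ m % 3 = 2 := by omega
        rw [hM]
        rcases h01 with h' | h' | h' <;> rw [h'] <;> constructor <;> intro hh <;> omega
      -- unfold one step of the loop and one digit of m
      rw [sysB_loop, if_pos hcond, PySem.Int.floordiv_eq_ediv_of_pos h3p, hdd]
      have hk' : (n / (p * 3)).toNat ≤ k := by
        have : n / (p * 3) = m / 3 := by rw [mul_comm p 3, hdd]
        rw [this]; omega
      rw [ih n (p * 3) _ _ hn (by omega) hk']
      have hpd : n / (p * 3) = m / 3 := by rw [mul_comm p 3, hdd]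
      have hdigs : pvDigs m = m % 3 :: pvDigs (m / 3) := by
        rw [pvDigs, dif_pos (by omega : m > 0),
          PySem.Int.mod_eq_emod_of_pos (by omega : (0:Int) < 3),
          PySem.Int.floordiv_eq_ediv_of_pos (by omega : (0:Int) < 3)]
      rw [hpd, hdigs]
      have hm3 : 3 * (m / 3) + m % 3 = m := by omega
      rw [Prod.mk.injEq]
      constructor
      · simp only [List.sum_cons]; omega
      · simp only [List.count_cons]
        by_cases h2 : m % 3 = 2
        · rw [if_pos (hdig.mpr h2)]
          simp [h2]
          omega
        · rw [if_neg (fun hh => h2 (hdig.mp hh))]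
          have : ¬ ((m % 3) == (2:Int)) = true := by simpa using h2
          simp [this]
    · have h0 : n / p = 0 := Int.ediv_eq_zero_of_lt hn (by omega)
      rw [sysB_loop, if_neg hcond, h0]
      simp [pvDigs]

-- ===== VERDICT (by name: the statement is the Claim_ definition above) =====
theorem system_trojkowy_spec : Claim_equal_system_trojkowy := by
  intro n _
  unfold Spec_system_trojkowy system_trojkowy system_trojkowy_alt
  by_cases hn : 0 < n
  · rw [sysB_loop_eq n.toNat n 1 n 0 (by omega) (by omega) (by simp),
      sysA_loop_eq_digs n.toNat n (le_refl _)]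
    rw [Int.ediv_one]
    have hsum := sum_eq_counts (pvDigs n) (mem_pvDigs n)
    simp only [PySem.List.count_eq, gt_iff_lt, decide_eq_decide]
    omega
  · have h0 : n.toNat = 0 := by omega
    rw [h0]
    simp [sysA_loop, sysB_loop, PySem.List.count]
    omega
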